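-- pv_equiv track=rewrite | github.com/FeedAFish/Blitz-game | utils/xo.py | find_consecutive_xo
-- ===== SOURCE A (Python) =====
-- def find_consecutive_xo(lst):
--     count = 1
--     for index, star in enumerate(lst[1:], start=1):
--         if star == lst[index - 1] and star != 0:
--             count += 1
--             if count >= 5:
--                 return star
--         else:
--             count = 1
--     return
-- ===== SOURCE B (Python) =====
-- def find_consecutive_xo(lst):
--     # Scan by maximal runs: find the end of each run of equal values with a
--     # second index, test the run once, then jump past it.
--     i, n = 0, len(lst)
--     while i < n:
--         j = i
--         while j < n and lst[j] == lst[i]: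
--             j += 1
--         if lst[i] != 0 and j - i >= 5:
--             return lst[i]
--         i = j
--     return None
-- ===== Notes on version B (the rewrite author's own statement) =====
-- stated objective: alternative
-- what changed: Replaced the running-counter pass over enumerate(lst[1:]) with a runs decomposition: a two-index loop finds the end of each maximal run of equal values, tests the whole run once (value != 0 and length >= 5), and jumps past it.
import Mathlib
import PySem

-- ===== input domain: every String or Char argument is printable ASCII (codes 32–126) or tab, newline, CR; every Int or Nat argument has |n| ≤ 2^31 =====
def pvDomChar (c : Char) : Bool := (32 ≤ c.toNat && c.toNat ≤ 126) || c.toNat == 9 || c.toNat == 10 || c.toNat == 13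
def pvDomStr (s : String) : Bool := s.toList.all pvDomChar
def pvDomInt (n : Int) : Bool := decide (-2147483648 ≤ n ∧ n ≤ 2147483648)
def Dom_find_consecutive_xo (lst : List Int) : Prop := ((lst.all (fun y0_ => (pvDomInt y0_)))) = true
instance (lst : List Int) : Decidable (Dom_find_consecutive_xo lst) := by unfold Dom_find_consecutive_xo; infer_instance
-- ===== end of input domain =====

-- B replaces A's running counter over enumerate(lst[1:]) with a runs decomposition
-- (find each maximal run's end, test the run once, jump past it); objective: alternative.

-- ===== PORT A =====
-- the for-loop with early return, over list(enumerate(lst[1:], start=1)), state = count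
def find_consecutive_xo_go (lst : List Int) (pairs : List (Int × Int)) (count : Int) : Option Int :=
  match pairs with
  | [] => none
  | (index, star) :: rest =>
    match PySem.List.pyGet? lst (index - 1) with
    | none => none   -- unreachable: index ≥ 1 and index < len(lst) for the actual call sites
    | some prev =>
      if star = prev ∧ star ≠ 0 then
        if count + 1 ≥ 5 then some star
        else find_consecutive_xo_go lst rest (count + 1)
      else find_consecutive_xo_go lst rest 1

def find_consecutive_xo (lst : List Int) : Option Int :=
  find_consecutive_xo_go lst (PySem.List.enumerate (PySem.List.slice lst (some 1) none) 1) 1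

-- ===== PORT B =====
-- inner while loop: advance j while j < n and lst[j] == lst[i]
def altRunEnd (lst : List Int) (i j : Nat) : Nat :=
  if h : j < lst.length ∧ lst.getD j 0 = lst.getD i 0 then altRunEnd lst i (j + 1) else j
termination_by lst.length - j
decreasing_by omega

lemma le_altRunEnd (lst : List Int) (i j : Nat) : j ≤ altRunEnd lst i j := by
  fun_induction altRunEnd <;> omega

lemma lt_altRunEnd_self (lst : List Int) (i : Nat) (h : i < lst.length) :
    i < altRunEnd lst i i := by
  rw [altRunEnd, dif_pos (show i < lst.length ∧ lst.getD i 0 = lst.getD i 0 from ⟨h, rfl⟩)]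
  have := le_altRunEnd lst i (i + 1)
  omega

-- outer while loop: one step per maximal run
def altLoop (lst : List Int) (i : Nat) : Option Int :=
  if _h : i < lst.length then
    let j := altRunEnd lst i i
    if lst.getD i 0 ≠ 0 ∧ 5 ≤ (j : Int) - (i : Int) then some (lst.getD i 0)
    else altLoop lst j
  else none
termination_by lst.length - i
decreasing_by
  have := lt_altRunEnd_self lst i _h
  omega

def find_consecutive_xo_alt (lst : List Int) : Option Int := altLoop lst 0

-- ===== PRECONDITION & SPEC =====
def Spec_find_consecutive_xo (lst : List Int) (out : Option Int) : Prop := out = find_consecutive_xo_alt lst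
instance (lst : List Int) (out : Option Int) : Decidable (Spec_find_consecutive_xo lst out) := by unfold Spec_find_consecutive_xo; infer_instance

-- ===== CLAIM (what is proved, stated in full; the proofs are below) =====
def Claim_equal_find_consecutive_xo : Prop := ∀ (lst : List Int), Dom_find_consecutive_xo lst → Spec_find_consecutive_xo lst (find_consecutive_xo lst)

-- ===== LEMMAS AND PROOFS =====

-- the enumerate suffix A's loop still has to process, starting at position i
def pairsFrom (lst : List Int) (i : Nat) : List (Int × Int) :=
  PySem.List.enumerate (lst.drop i) (i : Int)

lemma pairsFrom_nil (lst : List Int) (h : lst.length ≤ i) : pairsFrom lst i = [] := by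
  simp [pairsFrom, List.drop_eq_nil_of_le h]

lemma pairsFrom_cons (lst : List Int) (i : Nat) (h : i < lst.length) :
    pairsFrom lst i = ((i : Int), lst.getD i 0) :: pairsFrom lst (i + 1) := by
  unfold pairsFrom
  rw [List.drop_eq_getElem_cons h, PySem.List.enumerate_cons,
      List.getD_eq_getElem lst 0 h]
  norm_num

lemma altRunEnd_ge (lst : List Int) (i : Nat) :
    ∀ j e, j ≤ e → e ≤ lst.length →
      (∀ k, j ≤ k → k < e → lst.getD k 0 = lst.getD i 0) →
      e ≤ altRunEnd lst i j := by
  have H : ∀ d j e, e - j ≤ d → j ≤ e → e ≤ lst.length →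
      (∀ k, j ≤ k → k < e → lst.getD k 0 = lst.getD i 0) → e ≤ altRunEnd lst i j := by
    intro d
    induction d with
    | zero =>
      intro j e h1 h2 _ _
      have : e = j := by omega
      subst this
      exact le_altRunEnd lst i e
    | succ d ih =>
      intro j e h1 h2 h3 h4
      rcases eq_or_lt_of_le h2 with rfl | hlt
      · exact le_altRunEnd lst i j
      · rw [altRunEnd, dif_pos ⟨by omega, h4 j le_rfl hlt⟩]
        exact ih (j + 1) e (by omega) (by omega) h3 (fun k hk1 hk2 => h4 k (by omega) hk2)
  intro j e h1 h2 h3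
  exact H (e - j) j e le_rfl h1 h2 h3

lemma altRunEnd_eq (lst : List Int) (i : Nat) :
    ∀ j e, j ≤ e → e ≤ lst.length →
      (∀ k, j ≤ k → k < e → lst.getD k 0 = lst.getD i 0) →
      (e = lst.length ∨ lst.getD e 0 ≠ lst.getD i 0) →
      altRunEnd lst i j = e := by
  have H : ∀ d j e, e - j ≤ d → j ≤ e → e ≤ lst.length →
      (∀ k, j ≤ k → k < e → lst.getD k 0 = lst.getD i 0) →
      (e = lst.length ∨ lst.getD e 0 ≠ lst.getD i 0) →
      altRunEnd lst i j = e := by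
    intro d
    induction d with
    | zero =>
      intro j e h1 h2 h3 _ h5
      have hje : j = e := by omega
      subst hje
      rw [altRunEnd, dif_neg]
      rintro ⟨hlt, heq⟩
      rcases h5 with h5 | h5
      · omega
      · exact h5 heq
    | succ d ih =>
      intro j e h1 h2 h3 h4 h5
      rcases eq_or_lt_of_le h2 with rfl | hlt
      · rw [altRunEnd, dif_neg]
        rintro ⟨hl, heq⟩
        rcases h5 with h5 | h5
        · omega
        · exact h5 heq
      · rw [altRunEnd, dif_pos ⟨by omega, h4 j le_rfl hlt⟩]
        exact ih (j + 1) e (by omega) (by omega) h3 (fun k hk1 hk2 => h4 k (by omega) hk2) h5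
  intro j e h1 h2 h3 h4
  exact H (e - j) j e le_rfl h1 h2 h3 h4

lemma go_nil (lst : List Int) (c : Int) : find_consecutive_xo_go lst [] c = none := rfl

lemma go_cons (lst : List Int) (rest : List (Int × Int)) (idx star count prev : Int)
    (hpg : PySem.List.pyGet? lst (idx - 1) = some prev) :
    find_consecutive_xo_go lst ((idx, star) :: rest) count =
      if star = prev ∧ star ≠ 0 then
        (if count + 1 ≥ 5 then some star else find_consecutive_xo_go lst rest (count + 1))
      else find_consecutive_xo_go lst rest 1 := by
  simp only [find_consecutive_xo_go, hpg]

lemma altLoop_eq (lst : List Int) (i : Nat) (h : i < lst.length) :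
    altLoop lst i =
      if lst.getD i 0 ≠ 0 ∧ 5 ≤ ((altRunEnd lst i i : Nat) : Int) - (i : Int) then
        some (lst.getD i 0)
      else altLoop lst (altRunEnd lst i i) := by
  rw [altLoop, dif_pos h]

lemma altLoop_none (lst : List Int) (i : Nat) (h : ¬ i < lst.length) :
    altLoop lst i = none := by
  rw [altLoop, dif_neg h]

lemma main_lemma (lst : List Int) :
    ∀ m i, lst.length - i = m → 1 ≤ i → i ≤ lst.length →
      ((∀ c : Nat, 1 ≤ c → c ≤ 4 → c ≤ i →
          (∀ k, i - c ≤ k → k < i → lst.getD k 0 = lst.getD (i - c) 0) →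
          (i - c = 0 ∨ lst.getD (i - c - 1) 0 ≠ lst.getD (i - c) 0) →
          lst.getD (i - c) 0 ≠ 0 →
          find_consecutive_xo_go lst (pairsFrom lst i) (c : Int) = altLoop lst (i - c))
       ∧
       (lst.getD (i - 1) 0 = 0 →
          ∀ r, r < i →
            (∀ k, r ≤ k → k < i → lst.getD k 0 = 0) →
            (r = 0 ∨ lst.getD (r - 1) 0 ≠ 0) →
            find_consecutive_xo_go lst (pairsFrom lst i) 1 = altLoop lst r)) := by
  intro m
  induction m with
  | zero =>
    intro i hm h1 hn
    have hin : i = lst.length := by omega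
    subst hin
    rw [pairsFrom_nil lst le_rfl]
    constructor
    · intro c hc1 hc4 hci hrun _ _
      have hr : lst.length - c < lst.length := by omega
      have he : altRunEnd lst (lst.length - c) (lst.length - c) = lst.length :=
        altRunEnd_eq lst _ _ _ (by omega) le_rfl (fun k hk1 hk2 => hrun k hk1 hk2) (Or.inl rfl)
      rw [altLoop_eq lst _ hr, he, if_neg, altLoop_none lst _ (lt_irrefl _), go_nil]
      rintro ⟨-, h5⟩
      omega
    · intro _ r hrlt hzeros _
      have hgr : lst.getD r 0 = 0 := hzeros r le_rfl hrlt
      have he : altRunEnd lst r r = lst.length :=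
        altRunEnd_eq lst r r lst.length (by omega) le_rfl
          (fun k hk1 hk2 => by rw [hzeros k hk1 hk2, hgr]) (Or.inl rfl)
      rw [altLoop_eq lst r (by omega), he, if_neg, altLoop_none lst _ (lt_irrefl _), go_nil]
      rintro ⟨hne, -⟩
      exact hne hgr
  | succ m ih =>
    intro i hm h1 hn
    have hilt : i < lst.length := by omega
    have hpg : PySem.List.pyGet? lst ((i : Int) - 1) = some (lst.getD (i - 1) 0) := by
      have h' : (i : Int) - 1 = ((i - 1 : Nat) : Int) := by omega
      rw [h', PySem.List.pyGet?_natCast, List.getElem?_eq_getElem (by omega),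
          List.getD_eq_getElem lst 0 (by omega)]
    rw [pairsFrom_cons lst i hilt]
    constructor
    · -- inside (or at the start of) a run of a nonzero value
      intro c hc1 hc4 hci hrun hstart hnz
      have hprev : lst.getD (i - 1) 0 = lst.getD (i - c) 0 := hrun (i - 1) (by omega) (by omega)
      rw [go_cons lst _ _ _ _ _ hpg]
      by_cases hb : lst.getD i 0 = lst.getD (i - 1) 0 ∧ lst.getD i 0 ≠ 0
      · rw [if_pos hb]
        by_cases hc5 : c = 4
        · subst hc5
          rw [if_pos (by norm_num)]
          have hge : i + 1 ≤ altRunEnd lst (i - 4) (i - 4) :=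
            altRunEnd_ge lst (i - 4) (i - 4) (i + 1) (by omega) (by omega)
              (fun k hk1 hk2 => by
                rcases Nat.lt_or_ge k i with hk | hk
                · exact hrun k hk1 hk
                · have hki : k = i := by omega
                  subst hki
                  rw [hb.1, hprev])
          rw [altLoop_eq lst _ (by omega : i - 4 < lst.length),
              if_pos ⟨hnz, by omega⟩, hb.1, hprev]
        · rw [if_neg (by omega)]
          have hcast : (c : Int) + 1 = ((c + 1 : Nat) : Int) := by push_cast; ring
          rw [hcast]
          have hnext := (ih (i + 1) (by omega) (by omega) (by omega)).1 (c + 1)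
            (by omega) (by omega) (by omega)
            (fun k hk1 hk2 => by
              rcases Nat.lt_or_ge k i with hk | hk
              · have h' : i + 1 - (c + 1) = i - c := by omega
                rw [h']
                exact hrun k (by omega) hk
              · have hki : k = i := by omega
                subst hki
                have h' : k + 1 - (c + 1) = k - c := by omega
                rw [h', hb.1, hprev])
            (by
              have h' : i + 1 - (c + 1) = i - c := by omega
              rw [h']
              exact hstart)
            (by
              have h' : i + 1 - (c + 1) = i - c := by omega
              rw [h']
              exact hnz)
          have h' : i + 1 - (c + 1) = i - c := by omega
          rw [h'] at hnext
          exact hnext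
      · rw [if_neg hb]
        have hne : lst.getD i 0 ≠ lst.getD (i - c) 0 := by
          intro hEq
          exact hb ⟨by rw [hEq, hprev], by rw [hEq]; exact hnz⟩
        have he : altRunEnd lst (i - c) (i - c) = i :=
          altRunEnd_eq lst (i - c) (i - c) i (by omega) (by omega)
            (fun k hk1 hk2 => hrun k hk1 hk2) (Or.inr (fun hEq => hne hEq))
        rw [altLoop_eq lst _ (by omega : i - c < lst.length), he,
            if_neg (by rintro ⟨-, h5⟩; omega)]
        by_cases hz : lst.getD i 0 = 0
        · exact (ih (i + 1) (by omega) (by omega) (by omega)).2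
            (by simpa using hz) i (by omega)
            (fun k hk1 hk2 => by
              have hki : k = i := by omega
              subst hki; exact hz)
            (Or.inr (by rw [hprev]; exact hnz))
        · have hnext := (ih (i + 1) (by omega) (by omega) (by omega)).1 1
            (by omega) (by omega) (by omega)
            (fun k hk1 hk2 => by
              have hki : k = i := by omega
              subst hki
              have h' : k + 1 - 1 = k := by omega
              rw [h'])
            (by
              right
              have h' : i + 1 - 1 = i := by omega
              rw [h']
              have h'' : i - 1 = i - 1 := rfl
              intro hEq
              exact hne (by rw [← hEq, hprev])
              )
            (by
              have h' : i + 1 - 1 = i := by omega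
              rw [h']
              exact hz)
          have h' : i + 1 - 1 = i := by omega
          rw [h'] at hnext
          simpa using hnext
    · -- the previous element is 0: we are walking through (or just past) a zero run
      intro hz0 r hrlt hzeros hstart
      have hgr : lst.getD r 0 = 0 := hzeros r le_rfl hrlt
      rw [go_cons lst _ _ _ _ _ hpg]
      rw [if_neg (by rintro ⟨hEq, hne⟩; exact hne (by rw [hEq, hz0]))]
      by_cases hz : lst.getD i 0 = 0
      · exact (ih (i + 1) (by omega) (by omega) (by omega)).2
          (by simpa using hz) r (by omega)
          (fun k hk1 hk2 => by
            rcases Nat.lt_or_ge k i with hk | hk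
            · exact hzeros k hk1 hk
            · have hki : k = i := by omega
              subst hki; exact hz)
          hstart
      · have he : altRunEnd lst r r = i :=
          altRunEnd_eq lst r r i (by omega) (by omega)
            (fun k hk1 hk2 => by rw [hzeros k hk1 hk2, hgr])
            (Or.inr (fun hEq => hz (by rw [hEq, hgr])))
        rw [altLoop_eq lst r (by omega), he,
            if_neg (by rintro ⟨hne, -⟩; exact hne hgr)]
        have hnext := (ih (i + 1) (by omega) (by omega) (by omega)).1 1
          (by omega) (by omega) (by omega)
          (fun k hk1 hk2 => by
            have hki : k = i := by omega
            subst hki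
            have h' : k + 1 - 1 = k := by omega
            rw [h'])
          (by
            right
            have h' : i + 1 - 1 = i := by omega
            rw [h']
            intro hEq
            exact hz (by rw [← hEq, hz0]))
          (by
            have h' : i + 1 - 1 = i := by omega
            rw [h']
            exact hz)
        have h' : i + 1 - 1 = i := by omega
        rw [h'] at hnext
        simpa using hnext

-- ===== VERDICT (by name: the statement is the Claim_ definition above) =====
theorem find_consecutive_xo_spec : Claim_equal_find_consecutive_xo := by
  intro lst _
  unfold Spec_find_consecutive_xo find_consecutive_xo find_consecutive_xo_alt
  rw [PySem.List.slice_from_one, ← List.drop_one]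
  rcases Nat.eq_zero_or_pos lst.length with hlen | hlen
  · have : lst = [] := List.eq_nil_of_length_eq_zero hlen
    subst this
    rw [altLoop_none _ _ (by omega)]
    rfl
  · have hpf : PySem.List.enumerate (lst.drop 1) 1 = pairsFrom lst 1 := by
      unfold pairsFrom
      norm_num
    rw [hpf]
    have H := main_lemma lst (lst.length - 1) 1 rfl le_rfl (by omega)
    by_cases hz : lst.getD 0 0 = 0
    · have := H.2 (by simpa using hz) 0 (by omega)
        (fun k hk1 hk2 => by rw [Nat.lt_one_iff.mp hk2]; exact hz)
        (Or.inl rfl)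
      simpa using this
    · have := H.1 1 le_rfl (by omega) le_rfl
        (fun k hk1 hk2 => by rw [Nat.lt_one_iff.mp hk2])
        (Or.inl rfl)
        (by simpa using hz)
      simpa using this
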